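-- pv_equiv track=rewrite | github.com/rmoskwa/Pulsepal | pulsepal/sql_validator.py | format_column_list
-- ===== SOURCE A (Python) =====
-- from typing import Any, Dict, List
--
-- def format_column_list(columns: List[str]) -> str:
--     """Format a list of columns for display."""
--     # Group into 3 columns for compact display
--     if len(columns) <= 6:
--         return "\n".join(f"• `{col}`" for col in columns)
--
--     # Multi-column layout
--     result = []
--     for i in range(0, len(columns), 3):
--         group = columns[i : i + 3]
--         row = " | ".join(f"`{col}`" for col in group)
--         result.append(f"• {row}")
--     return "\n".join(result)
-- ===== SOURCE B (Python) =====
-- def format_column_list(columns):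
--     """Format a list of columns for display (single accumulator pass, no slicing)."""
--     step = 1 if len(columns) <= 6 else 3
--     groups = []
--     cur = []
--     for c in columns:
--         cur.append(c)
--         if len(cur) == step:
--             groups.append(cur)
--             cur = []
--     if cur:
--         groups.append(cur)
--     return "\n".join(
--         "• " + " | ".join(f"`{c}`" for c in g) for g in groups
--     )
-- ===== Notes on version B (the rewrite author's own statement) =====
-- stated objective: simpler
-- what changed: Replaced A's two separate branches (a per-element join for short lists, an index-range loop over slices for long ones) by one element-wise accumulator pass that groups the list into chunks of a computed step size, rendered by a single join.
import Mathlib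
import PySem

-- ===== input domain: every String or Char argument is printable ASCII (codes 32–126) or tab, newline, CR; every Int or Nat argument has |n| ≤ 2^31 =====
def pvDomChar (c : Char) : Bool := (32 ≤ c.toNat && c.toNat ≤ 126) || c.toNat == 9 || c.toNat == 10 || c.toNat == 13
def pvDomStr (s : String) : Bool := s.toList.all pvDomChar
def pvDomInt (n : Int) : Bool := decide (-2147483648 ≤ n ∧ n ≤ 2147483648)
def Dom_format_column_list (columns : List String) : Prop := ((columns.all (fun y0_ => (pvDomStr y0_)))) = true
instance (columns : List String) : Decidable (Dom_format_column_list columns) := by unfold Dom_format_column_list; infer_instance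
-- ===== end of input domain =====

-- B unifies A's two layouts into one accumulator pass that chunks the list by a computed step size (objective: simpler); return values proved equal.
-- ===== PORT A =====
-- literal port of A: branch on len <= 6, else an index loop over range(0, len, 3) with slices
def format_column_list (columns : List String) : String :=
  if columns.length ≤ 6 then
    PySem.Str.join "\n" (columns.map (fun col => "• `" ++ col ++ "`"))
  else
    let result : List String :=
      (PySem.List.pyRange 0 (columns.length : Int) 3).foldl
        (fun result i =>
          let group := PySem.List.slice columns (some i) (some (i + 3))
          let row := PySem.Str.join " | " (group.map (fun col => "`" ++ col ++ "`"))
          result ++ ["• " ++ row]) []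
    PySem.Str.join "\n" result

-- ===== PORT B =====
-- B's loop body: append c to the current group, flush it when it reaches `step`
def pvStepFold (step : Nat) (acc : List (List String) × List String) (c : String) :
    List (List String) × List String :=
  let cur := acc.2 ++ [c]
  if cur.length = step then (acc.1 ++ [cur], []) else (acc.1, cur)

def format_column_list_alt (columns : List String) : String :=
  let step := if columns.length ≤ 6 then 1 else 3
  let p := columns.foldl (pvStepFold step) ([], [])
  let groups := if p.2 ≠ [] then p.1 ++ [p.2] else p.1
  PySem.Str.join "\n"
    (groups.map (fun g => "• " ++ PySem.Str.join " | " (g.map (fun c => "`" ++ c ++ "`"))))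

-- ===== PRECONDITION & SPEC =====
def Spec_format_column_list (columns : List String) (out : String) : Prop := out = format_column_list_alt columns
instance (columns : List String) (out : String) : Decidable (Spec_format_column_list columns out) := by unfold Spec_format_column_list; infer_instance

-- ===== CLAIM (what is proved, stated in full; the proofs are below) =====
def Claim_equal_format_column_list : Prop := ∀ (columns : List String), Dom_format_column_list columns → Spec_format_column_list columns (format_column_list columns)

-- ===== LEMMAS AND PROOFS =====

-- proof-side chunking function: the common characterisation both ports are reduced to
def pvChunks (step : Nat) (xs : List String) : List (List String) :=
  if xs.length ≤ step ∨ step = 0 then [xs]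
  else xs.take step :: pvChunks step (xs.drop step)
termination_by xs.length
decreasing_by
  rename_i h
  simp only [not_or, not_le] at h
  simp only [List.length_drop]
  omega

lemma pvChunks_one (xs : List String) (h : xs ≠ []) :
    pvChunks 1 xs = xs.map (fun x => [x]) := by
  induction xs with
  | nil => exact absurd rfl h
  | cons a t ih =>
    rw [pvChunks]
    cases t with
    | nil => simp
    | cons b u =>
      simp only [List.length_cons, List.map_cons]
      rw [if_neg (by simp)]
      simp only [List.take_succ_cons, List.take_zero, List.drop_succ_cons, List.drop_zero]
      exact congrArg _ (ih (by simp))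

lemma pvRangeChunks (xs : List String) (h : xs ≠ []) :
    (List.range ((xs.length + 2) / 3)).map (fun k => (xs.drop (3 * k)).take 3)
      = pvChunks 3 xs := by
  generalize hn : xs.length = n
  induction n using Nat.strong_induction_on generalizing xs with
  | _ n ih =>
    subst hn
    rw [pvChunks]
    by_cases hle : xs.length ≤ 3
    · rw [if_pos (Or.inl hle)]
      have h1 : (xs.length + 2) / 3 = 1 := by
        have : 0 < xs.length := List.length_pos_iff.mpr h
        omega
      rw [h1]
      simp [List.take_of_length_le hle]
    · rw [if_neg (by simp [hle])]
      push_neg at hle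
      have h3 : (xs.length + 2) / 3 = ((xs.drop 3).length + 2) / 3 + 1 := by
        simp only [List.length_drop]; omega
      rw [h3, List.range_succ_eq_map, List.map_cons, List.map_map]
      congr 1
      have := ih ((xs.drop 3).length) (by simp only [List.length_drop]; omega)
        (xs.drop 3) (by
          intro hc
          have := congrArg List.length hc
          simp only [List.length_drop, List.length_nil] at this
          omega) rfl
      have hlen : (List.drop 3 xs).length = xs.length - 3 := by simp
      rw [← this, hlen]
      apply List.map_congr_left
      intro k _
      simp only [Function.comp]
      rw [List.drop_drop]
      congr 2
      omega

lemma pvFoldSmall (step : Nat) (xs : List String) (gs : List (List String)) (cur : List String)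
    (h : cur.length + xs.length < step) :
    xs.foldl (pvStepFold step) (gs, cur) = (gs, cur ++ xs) := by
  induction xs generalizing cur with
  | nil => simp
  | cons a t ih =>
    simp only [List.foldl_cons, pvStepFold]
    rw [if_neg (by simp only [List.length_append, List.length_singleton]; simp at h; omega)]
    rw [ih (cur ++ [a]) (by simp only [List.length_append, List.length_singleton]; simp at h ⊢; omega)]
    simp

lemma pvFoldFlush (step : Nat) (xs : List String) (gs : List (List String)) (cur : List String)
    (h1 : cur.length < step) (h2 : step ≤ cur.length + xs.length) :
    xs.foldl (pvStepFold step) (gs, cur)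
      = (xs.drop (step - cur.length)).foldl (pvStepFold step)
          (gs ++ [cur ++ xs.take (step - cur.length)], []) := by
  induction xs generalizing gs cur with
  | nil => simp at h2; omega
  | cons a t ih =>
    by_cases hstep : (cur ++ [a]).length = step
    · simp only [List.foldl_cons, pvStepFold]
      rw [if_pos hstep]
      have hone : step - cur.length = 1 := by
        simp only [List.length_append, List.length_singleton] at hstep; omega
      rw [hone]
      simp
    · simp only [List.foldl_cons, pvStepFold]
      rw [if_neg hstep]
      have hlen : (cur ++ [a]).length = cur.length + 1 := by simp
      have h1' : (cur ++ [a]).length < step := by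
        rw [hlen]; rw [hlen] at hstep; omega
      have h2' : step ≤ (cur ++ [a]).length + t.length := by
        simp only [List.length_cons] at h2; rw [hlen]; omega
      rw [ih gs (cur ++ [a]) h1' h2']
      have hgap : 1 ≤ step - cur.length := by omega
      have htake : (a :: t).take (step - cur.length) = a :: t.take (step - cur.length - 1) := by
        cases hsc : step - cur.length with
        | zero => omega
        | succ m => simp [List.take_succ_cons]
      have hdrop : (a :: t).drop (step - cur.length) = t.drop (step - cur.length - 1) := by
        cases hsc : step - cur.length with
        | zero => omega
        | succ m => simp [List.drop_succ_cons]
      rw [htake, hdrop]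
      have hsub : step - (cur ++ [a]).length = step - cur.length - 1 := by rw [hlen]; omega
      rw [hsub]
      simp

lemma pvFoldChunks (step : Nat) (hstep : 0 < step) (xs : List String) (h : xs ≠ [])
    (gs : List (List String)) :
    (if (xs.foldl (pvStepFold step) (gs, [])).2 ≠ [] then
        (xs.foldl (pvStepFold step) (gs, [])).1 ++ [(xs.foldl (pvStepFold step) (gs, [])).2]
      else (xs.foldl (pvStepFold step) (gs, [])).1)
      = gs ++ pvChunks step xs := by
  generalize hn : xs.length = n
  induction n using Nat.strong_induction_on generalizing xs gs with
  | _ n ih =>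
    subst hn
    rw [pvChunks]
    by_cases hle : xs.length ≤ step
    · rw [if_pos (Or.inl hle)]
      by_cases heq : xs.length = step
      · have := pvFoldFlush step xs gs [] (by simpa using hstep) (by simpa using heq.ge)
        simp only [List.length_nil, Nat.sub_zero, List.nil_append] at this
        rw [this]
        rw [← heq, List.take_length, List.drop_length]
        simp
      · have := pvFoldSmall step xs gs [] (by simp; omega)
        rw [this]
        simp [h]
    · rw [if_neg (show ¬(xs.length ≤ step ∨ step = 0) by simp only [not_or]; exact ⟨hle, by omega⟩)]
      push_neg at hle
      have := pvFoldFlush step xs gs [] (by simpa using hstep) (by simp; omega)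
      simp only [List.length_nil, Nat.sub_zero, List.nil_append] at this
      rw [this]
      have hne : xs.drop step ≠ [] := by
        intro hc
        have := congrArg List.length hc
        simp only [List.length_drop, List.length_nil] at this
        omega
      rw [ih ((xs.drop step).length) (by simp only [List.length_drop]; omega)
        (xs.drop step) hne (gs ++ [xs.take step]) rfl]
      simp

lemma pvJoinSingleton (sep x : String) : PySem.Str.join sep [x] = x := by
  simp [PySem.Str.join, PySem.Chars.join_singleton]

lemma pvLitEq : ("• " ++ "`" : String) = "• `" := by rfl

lemma pvRowEq (c : String) : "• " ++ ("`" ++ c ++ "`") = "• `" ++ c ++ "`" := by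
  rw [← String.append_assoc, ← String.append_assoc, pvLitEq]

lemma pvFoldlAppend (f : Int → String) (l : List Int) (init : List String) :
    l.foldl (fun r i => r ++ [f i]) init = init ++ l.map f := by
  induction l generalizing init with
  | nil => simp
  | cons a t ih => simp [ih]

-- ===== VERDICT (by name: the statement is the Claim_ definition above) =====
set_option maxHeartbeats 1600000 in
theorem format_column_list_spec : Claim_equal_format_column_list := by
  intro columns _
  unfold Spec_format_column_list
  by_cases hnil : columns = []
  · subst hnil; rfl
  · by_cases h6 : columns.length ≤ 6
    · simp only [format_column_list, format_column_list_alt]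
      simp only [h6, if_pos]
      rw [pvFoldChunks 1 (by omega) columns hnil []]
      rw [List.nil_append, pvChunks_one columns hnil, List.map_map]
      congr 1
      apply List.map_congr_left
      intro c _
      simp only [Function.comp]
      simp only [List.map_cons, List.map_nil]
      rw [pvJoinSingleton, pvRowEq]
    · simp only [format_column_list, format_column_list_alt]
      simp only [h6, if_neg, ite_false]
      rw [pvFoldChunks 3 (by omega) columns hnil []]
      rw [List.nil_append]
      rw [pvFoldlAppend (fun i => "• " ++ PySem.Str.join " | "
        ((PySem.List.slice columns (some i) (some (i + 3))).map (fun col => "`" ++ col ++ "`")))]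
      rw [List.nil_append]
      rw [PySem.List.pyRange_of_pos 0 (columns.length : Int) (by norm_num)]
      have hpos : (0 : Int) < (columns.length : Int) := by
        have : 6 < columns.length := Nat.lt_of_not_le h6
        omega
      rw [if_pos hpos]
      have hm : (((columns.length : Int) - 0 + 3 - 1) / 3).toNat = (columns.length + 2) / 3 := by
        omega
      rw [hm]
      rw [List.map_map]
      rw [← pvRangeChunks columns hnil]
      rw [List.map_map]
      congr 1
      apply List.map_congr_left
      intro k _
      simp only [Function.comp]
      have h2 : (0 + 3 * (k : Int) + 3) = ((3 * k : Nat) : Int) + ((3 : Nat) : Int) := by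
        push_cast; ring
      have h1 : (0 + 3 * (k : Int)) = ((3 * k : Nat) : Int) := by push_cast; ring
      rw [h2, h1, PySem.List.slice_natCast_add]
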